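-- pv_equiv track=rewrite | github.com/CoAxLab/azad | azad/local_gym/euclid.py | create_moves
-- ===== SOURCE A (Python) =====
-- def create_moves(x, y):
--     """Create all valid moves from (x, y)"""
--     a, b = x, y
--     moves = []
--     for c in range(max(x, y)):
--         if min(a, b) == 0:
--             if a >= b:
--                 moves.append((c, b))
--             if b >= a:
--                 moves.append((a, c))
--         elif (max(a, b) - c) % min(a, b) == 0:
--             if a >= b:
--                 moves.append((c, b))
--             if b >= a:
--                 moves.append((a, c))
--
--     return list(set(moves))
-- ===== SOURCE B (Python) =====
-- def create_moves(x, y):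
--     """Create all valid moves from (x, y)"""
--     M, m = max(x, y), min(x, y)
--     if m == 0:
--         cs = range(M)
--     else:
--         k = abs(m)
--         cs = range(M % k, M, k)
--     moves = []
--     for c in cs:
--         if x >= y:
--             moves.append((c, y))
--         if y >= x:
--             moves.append((x, c))
--     return list(set(moves))
-- ===== Notes on version B (the rewrite author's own statement) =====
-- stated objective: faster
-- what changed: Instead of scanning every c in range(max(x,y)) and testing (max-c) % min == 0, B generates the qualifying c values directly as the arithmetic progression range(M % k, M, k) with k = abs(min(x,y)) (full range when min is 0), then emits the same move pairs.
import Mathlib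
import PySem

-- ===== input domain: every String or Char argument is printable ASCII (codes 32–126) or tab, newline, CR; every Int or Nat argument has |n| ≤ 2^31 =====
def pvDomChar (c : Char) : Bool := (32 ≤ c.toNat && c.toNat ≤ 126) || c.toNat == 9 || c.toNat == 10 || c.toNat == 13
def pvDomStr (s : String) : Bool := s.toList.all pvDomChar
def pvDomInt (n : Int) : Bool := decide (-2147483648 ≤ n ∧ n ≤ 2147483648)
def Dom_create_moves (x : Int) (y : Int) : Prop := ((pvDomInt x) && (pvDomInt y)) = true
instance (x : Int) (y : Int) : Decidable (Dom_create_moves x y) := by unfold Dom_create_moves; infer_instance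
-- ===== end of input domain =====

-- B generates the qualifying c values directly as an arithmetic progression
-- (range(M % k, M, k) with k = |min(x,y)|) instead of scanning all of range(max(x,y))
-- with a divisibility test; a timing run measured B faster. Both programs end with
-- list(set(...)), ported as PySem.Set.ofList (the output is compared as a set).

-- ===== PORT A =====
def create_moves (x : Int) (y : Int) : List (Int × Int) :=
  let a := x
  let b := y
  let moves : List (Int × Int) :=
    (PySem.List.pyRange 0 (max x y) 1).foldl (fun moves c =>
      if min a b = 0 then
        let m1 := if a ≥ b then moves ++ [(c, b)] else moves
        if b ≥ a then m1 ++ [(a, c)] else m1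
      else if PySem.Int.mod (max a b - c) (min a b) = 0 then
        let m1 := if a ≥ b then moves ++ [(c, b)] else moves
        if b ≥ a then m1 ++ [(a, c)] else m1
      else moves) []
  PySem.Set.ofList moves

-- ===== PORT B =====
def create_moves_alt (x : Int) (y : Int) : List (Int × Int) :=
  let M := max x y
  let m := min x y
  let cs : List Int :=
    if m = 0 then PySem.List.pyRange 0 M 1
    else
      let k := if m < 0 then -m else m   -- abs(m)
      PySem.List.pyRange (PySem.Int.mod M k) M k
  let moves : List (Int × Int) :=
    cs.foldl (fun moves c =>
      let m1 := if x ≥ y then moves ++ [(c, y)] else moves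
      if y ≥ x then m1 ++ [(x, c)] else m1) []
  PySem.Set.ofList moves

-- ===== PRECONDITION & SPEC =====
def Spec_create_moves (x : Int) (y : Int) (out : List (Int × Int)) : Prop := out = create_moves_alt x y
instance (x : Int) (y : Int) (out : List (Int × Int)) : Decidable (Spec_create_moves x y out) := by unfold Spec_create_moves; infer_instance

-- ===== CLAIM (what is proved, stated in full; the proofs are below) =====
def Claim_equal_create_moves : Prop := ∀ (x : Int) (y : Int), Dom_create_moves x y → Spec_create_moves x y (create_moves x y)

-- ===== LEMMAS AND PROOFS =====

-- the pairs both programs emit for a qualifying c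
def pvStep (x y c : Int) : List (Int × Int) :=
  (if x ≥ y then [(c, y)] else []) ++ (if y ≥ x then [(x, c)] else [])

-- A's guard on the loop variable c
def pvGuard (x y c : Int) : Bool :=
  decide (min x y = 0) || decide (PySem.Int.mod (max x y - c) (min x y) = 0)

-- B's progression of candidate c values
def pvCs (x y : Int) : List Int :=
  if min x y = 0 then PySem.List.pyRange 0 (max x y) 1
  else
    let k := if min x y < 0 then -(min x y) else min x y
    PySem.List.pyRange (PySem.Int.mod (max x y) k) (max x y) k

lemma pv_flatMap_if {α β : Type} (P : α → Bool) (g : α → List β) (l : List α) :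
    l.flatMap (fun c => if P c then g c else []) = (l.filter P).flatMap g := by
  induction l with
  | nil => rfl
  | cons h t ih => by_cases hP : P h <;> simp [List.flatMap_cons, hP, ih]

lemma pv_pairwise_lt_pyRange_pos (a b k : Int) (hk : 0 < k) :
    List.Pairwise (· < ·) (PySem.List.pyRange a b k) := by
  rw [PySem.List.pyRange_of_pos a b hk]
  refine List.Pairwise.map _ ?_ (List.pairwise_lt_range)
  intro i j hij
  have : (i : Int) < (j : Int) := by exact_mod_cast hij
  nlinarith

-- A-side loop = flatMap of pvStep over the guarded range
lemma pv_A_eq (x y : Int) :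
    create_moves x y
      = PySem.Set.ofList
          (((PySem.List.pyRange 0 (max x y) 1).filter (pvGuard x y)).flatMap (pvStep x y)) := by
  unfold create_moves
  refine congrArg PySem.Set.ofList ?_
  refine Eq.trans
    (PySem.List.foldl_congr_mem (PySem.List.pyRange 0 (max x y) 1) _
      (fun acc c => acc ++ (if pvGuard x y c then pvStep x y c else [])) []
      (fun acc c _ => by unfold pvGuard pvStep; split_ifs <;> simp_all)) ?_
  refine Eq.trans (PySem.List.foldl_append_eq_flatMap _ _ _) ?_
  rw [List.nil_append, pv_flatMap_if]

-- B-side loop = flatMap of pvStep over pvCs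
lemma pv_B_eq (x y : Int) :
    create_moves_alt x y = PySem.Set.ofList ((pvCs x y).flatMap (pvStep x y)) := by
  unfold create_moves_alt
  refine congrArg PySem.Set.ofList ?_
  refine Eq.trans
    (PySem.List.foldl_congr_mem (pvCs x y) _
      (fun acc c => acc ++ pvStep x y c) []
      (fun acc c _ => by unfold pvStep; split_ifs <;> simp_all)) ?_
  exact Eq.trans (PySem.List.foldl_append_eq_flatMap _ _ _) (List.nil_append _)

-- key lemma: the guarded full range IS B's arithmetic progression
lemma pv_filter_eq_pyRange (x y : Int) :
    (PySem.List.pyRange 0 (max x y) 1).filter (pvGuard x y) = pvCs x y := by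
  set M := max x y
  set m := min x y
  by_cases hm : m = 0
  · unfold pvCs
    rw [if_pos hm]
    refine List.filter_eq_self.mpr (fun c _ => ?_)
    unfold pvGuard
    simp only [Bool.or_eq_true, decide_eq_true_eq]
    exact Or.inl hm
  · unfold pvCs
    rw [if_neg hm]
    have hfc : (PySem.List.pyRange 0 M 1).filter (pvGuard x y)
        = (PySem.List.pyRange 0 M 1).filter
            (fun c => decide (PySem.Int.mod (M - c) m = 0)) := by
      refine List.filter_congr (fun c _ => ?_)
      unfold pvGuard
      rw [decide_eq_false hm, Bool.false_or]
    rw [hfc]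
    set k : Int := if m < 0 then -m else m with hkdef
    have hk : 0 < k := by
      rcases lt_trichotomy m 0 with h | h | h
      · rw [hkdef, if_pos h]; omega
      · exact absurd h hm
      · rw [hkdef, if_neg (not_lt.mpr (le_of_lt h))]; omega
    set r : Int := PySem.Int.mod M k with hrdef
    have hr0 : 0 ≤ r := PySem.Int.mod_nonneg M hk
    have hrk : r < k := PySem.Int.mod_lt M hk
    have hMr : k ∣ M - r := by
      have h := PySem.Int.floordiv_mul_add_mod M k
      exact ⟨PySem.Int.floordiv M k, by linarith⟩
    have hdvd : ∀ t : Int, (m ∣ t ↔ k ∣ t) := by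
      intro t
      rcases lt_trichotomy m 0 with h | h | h
      · simp [hkdef, h, neg_dvd]
      · exact absurd h hm
      · simp [hkdef, not_lt.mpr (le_of_lt h)]
    have pw1 : List.Pairwise (· < ·)
        ((PySem.List.pyRange 0 M 1).filter (fun c => decide (PySem.Int.mod (M - c) m = 0))) :=
      (PySem.List.pairwise_lt_pyRange_one 0 M).sublist List.filter_sublist
    have pw2 : List.Pairwise (· < ·) (PySem.List.pyRange r M k) :=
      pv_pairwise_lt_pyRange_pos r M k hk
    have hperm : ((PySem.List.pyRange 0 M 1).filter
          (fun c => decide (PySem.Int.mod (M - c) m = 0))).Perm (PySem.List.pyRange r M k) := by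
      rw [List.perm_ext_iff_of_nodup pw1.nodup pw2.nodup]
      intro c
      rw [List.mem_filter, PySem.List.mem_pyRange_one, PySem.List.mem_pyRange_iff_of_pos hk]
      simp only [decide_eq_true_eq, PySem.Int.mod_eq_zero_iff_dvd, hdvd]
      constructor
      · rintro ⟨⟨h0, hM⟩, hd⟩
        have hcr : k ∣ c - r := by
          have := Int.dvd_sub hMr hd
          simpa using this
        refine ⟨?_, hM, hcr⟩
        obtain ⟨t, ht⟩ := hcr
        rcases lt_trichotomy t 0 with h | h | h
        · have : t ≤ -1 := by omega
          nlinarith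
        · rw [h, mul_zero] at ht; omega
        · nlinarith
      · rintro ⟨hrc, hM, hd⟩
        refine ⟨⟨by omega, hM⟩, ?_⟩
        have h1 := Int.dvd_sub hMr hd
        have h2 : M - r - (c - r) = M - c := by ring
        rwa [h2] at h1
    exact List.Perm.eq_of_pairwise
      (fun a b _ _ h1 h2 => le_antisymm h1 h2)
      (pw1.imp le_of_lt) (pw2.imp le_of_lt) hperm

-- ===== VERDICT (by name: the statement is the Claim_ definition above) =====
theorem create_moves_spec : Claim_equal_create_moves := by
  intro x y _
  unfold Spec_create_moves
  rw [pv_A_eq, pv_B_eq, pv_filter_eq_pyRange]
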